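-- pv_equiv track=rewrite | github.com/GabrieleTonello/product_distribution | main.py | product_allocation
-- ===== SOURCE A (Python) =====
-- GLOBAL_MODULE = 1000000007
--
-- def quick_sort(array:list[int]):
--     """
--     This function is an implementation of quick sort algorithm
--
--     :param array (list[int]): the array that is going to be ordered
--     :return : each time return an array with the pivot at its correct position
--     """
--     if len(array) > 1:
--         piv = len(array) // 2
--         val = array[piv]
--         left = [i for i in array if i < val] # creates an array with all the numbers that are minor than the pivot
--         mid = [i for i in array if i == val] # creates an array with all the numbers that are equal to the pivot
--         right = [i for i in array if i > val] # creates an array with all the numbers that are grater than the pivot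
--         return quick_sort(left) + mid + quick_sort(right)
--     else:
--         return array
--
-- def product_allocation(array1: list[int], array2: list[int]):
--     """
--     This function has to maximize the product allocation. In order to do that, first it orders the array and then calculates
--     the product allocation as defined in the task description.
--
--     :param array1 (list[int]): the first line, which contains 2 integers: n and m
--     :param array2 (list[int]): the second line, which contains n integers
--     :return sum (int): sum of each value in each segment, multiplied for the segment value
--     """
--     if array1[1] > array1[0]: # m <= n
--         raise ValueError("M has to be smaller than n!")
--
--     array2_ordered = quick_sort(array2) # order the array
--     number_full_segment = array1[0] // array1[1] # number of segments needed
--     rest = array1[0] % array1[1] # if there's any rest, it means that the last segment will have more than m elements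
--     if rest > 0:
--         number_full_segment -= 1 # decreases the number of full segments if rest != 0 because the last one hasn't at least m segments
--     left, right = 0, array1[1] # inizializates the first segment
--     sum = 0
--     for segment_index in range(1, number_full_segment +1  ):
--         for element in array2_ordered[left:right]: # sums every element in the segment and multiplies it by the segment_index
--             sum += element * segment_index
--         left += array1[1] # moves the extrem to go to the following segment
--         right += array1[1]
--     if rest > 0: # case when the last segment has more than m elements
--         for element in array2_ordered[left:]:
--             sum += element * (number_full_segment +1)
--     return sum % GLOBAL_MODULE # return the maximum sum of product allocation
-- ===== SOURCE B (Python) =====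
-- GLOBAL_MODULE = 1000000007
--
-- def product_allocation(array1, array2):
--     if array1[1] > array1[0]:
--         raise ValueError("M has to be smaller than n!")
--     n, m = array1[0], array1[1]
--     full, rest = divmod(n, m)  # ZeroDivisionError for m == 0, as in the original
--     k = full - 1 if rest > 0 else full
--     srt = sorted(array2)
--     prefix = [0]
--     for x in srt:
--         prefix.append(prefix[-1] + x)
--     L = len(srt)
--     def segment_sum(a, b):
--         return prefix[min(b, L)] - prefix[min(a, L)]
--     total = 0
--     for seg in range(1, k + 1):
--         total += seg * segment_sum((seg - 1) * m, seg * m)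
--     if rest > 0:
--         total += (k + 1) * segment_sum(k * m, L)
--     return total % GLOBAL_MODULE
-- ===== Notes on version B (the rewrite author's own statement) =====
-- stated objective: alternative
-- what changed: Replaces the hand-written quicksort by sorted() and the nested per-element segment scans (left/right slice bookkeeping) by a prefix-sum table queried once per segment, so the inner loops disappear.
-- outside the precondition, e.g. on product_allocation([-5, -5], [1, 2, 3, 4, 5, 6]): A returns 1, B returns 3; on product_allocation([-5, -5], [1, 2]): A returns 0, B raises IndexError
import Mathlib
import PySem

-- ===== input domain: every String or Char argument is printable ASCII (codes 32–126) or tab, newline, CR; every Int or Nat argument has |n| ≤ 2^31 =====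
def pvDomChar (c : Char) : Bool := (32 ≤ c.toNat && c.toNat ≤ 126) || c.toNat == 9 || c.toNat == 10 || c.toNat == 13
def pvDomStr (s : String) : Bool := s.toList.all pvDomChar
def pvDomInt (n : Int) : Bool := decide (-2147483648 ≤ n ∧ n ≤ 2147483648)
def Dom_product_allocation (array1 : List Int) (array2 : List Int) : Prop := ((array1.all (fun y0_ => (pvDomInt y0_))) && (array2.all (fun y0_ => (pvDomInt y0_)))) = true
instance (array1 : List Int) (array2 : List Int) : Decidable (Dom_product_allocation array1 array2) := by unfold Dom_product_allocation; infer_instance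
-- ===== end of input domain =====

-- B replaces A's hand-written quicksort by sorted() and A's nested per-element segment
-- scans by a prefix-sum table queried once per segment: the inner loops disappear.

-- ===== PORT A =====
-- quick_sort: len(array) // 2 is always in range when len > 1, so array[piv] is getD (exact
-- there); the fuel argument (a.length suffices, each recursive call strictly shrinks the list)
-- only makes the same recursion structural.
def quickSortGo : Nat → List Int → List Int
  | 0, a => a
  | fuel + 1, a =>
    if 1 < a.length then
      let val := a.getD (a.length / 2) 0
      quickSortGo fuel (a.filter (fun i => i < val)) ++ a.filter (fun i => i == val)
        ++ quickSortGo fuel (a.filter (fun i => i > val))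
    else a

def quickSortA (a : List Int) : List Int := quickSortGo a.length a

def product_allocation (array1 : List Int) (array2 : List Int) : Int :=
  let n := PySem.List.pyGetD array1 0 0
  let m := PySem.List.pyGetD array1 1 0
  if m > n then 0  -- raise ValueError (these inputs are excluded by Pre_)
  else
    let ordered := quickSortA array2
    let nfs0 := PySem.Int.floordiv n m  -- ZeroDivisionError for m = 0: excluded by Pre_
    let rest := PySem.Int.mod n m
    let nfs := if rest > 0 then nfs0 - 1 else nfs0
    let st := (PySem.List.pyRange 1 (nfs + 1) 1).foldl
      (fun (st : Int × Int × Int) seg =>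
        (st.1 + m, st.2.1 + m,
          (PySem.List.slice ordered (some st.1) (some st.2.1)).foldl
            (fun acc e => acc + e * seg) st.2.2))
      (0, m, 0)
    let s := if rest > 0 then
        (PySem.List.slice ordered (some st.1) none).foldl
          (fun acc e => acc + e * (nfs + 1)) st.2.2
      else st.2.2
    PySem.Int.mod s 1000000007

-- ===== PORT B =====
def product_allocation_alt (array1 : List Int) (array2 : List Int) : Int :=
  let n := PySem.List.pyGetD array1 0 0
  let m := PySem.List.pyGetD array1 1 0
  if m > n then 0  -- raise ValueError (excluded by Pre_)
  else
    let full := PySem.Int.floordiv n m  -- divmod: ZeroDivisionError for m = 0 (excluded by Pre_)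
    let rest := PySem.Int.mod n m
    let k := if rest > 0 then full - 1 else full
    let srt := PySem.List.sorted array2 (fun x => x) false
    let pfx := srt.foldl (fun acc x => acc ++ [PySem.List.pyGetD acc (-1) 0 + x]) [0]
    let L : Int := srt.length
    -- min(a, b) on two ints is Lean's min (exact); prefix[·] is in range on every path
    -- reached under Pre_, so pyGetD is exact there
    let segSum := fun (a b : Int) =>
      PySem.List.pyGetD pfx (min b L) 0 - PySem.List.pyGetD pfx (min a L) 0
    let total := (PySem.List.pyRange 1 (k + 1) 1).foldl
      (fun acc seg => acc + seg * segSum ((seg - 1) * m) (seg * m)) 0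
    let total2 := if rest > 0 then total + (k + 1) * segSum (k * m) L else total
    PySem.Int.mod total2 1000000007

-- ===== PRECONDITION & SPEC =====
-- Pre_ excludes the inputs where A raises (len(array1) < 2: IndexError; m > n: ValueError;
-- m = 0: ZeroDivisionError) and the single corner n = m < 0, outside the task's domain
-- (array1 = [n, m] with a positive segment size), where A's value comes from a negatively
-- bounded slice [0:m] while B's clamped prefix lookup wraps around or raises IndexError.
def Pre_product_allocation (array1 : List Int) (array2 : List Int) : Prop :=
  2 ≤ array1.length ∧ array1.getD 1 0 ≠ 0 ∧ array1.getD 1 0 ≤ array1.getD 0 0 ∧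
    (1 ≤ array1.getD 1 0 ∨ array1.getD 1 0 ≠ array1.getD 0 0)
instance (array1 : List Int) (array2 : List Int) : Decidable (Pre_product_allocation array1 array2) := by unfold Pre_product_allocation; infer_instance

def pvWitness_product_allocation : List Int × List Int := ([5, 2], [3, 1, 2, 4, 5])

def Spec_product_allocation (array1 : List Int) (array2 : List Int) (out : Int) : Prop := out = product_allocation_alt array1 array2
instance (array1 : List Int) (array2 : List Int) (out : Int) : Decidable (Spec_product_allocation array1 array2 out) := by unfold Spec_product_allocation; infer_instance

-- ===== CLAIM (what is proved, stated in full; the proofs are below) =====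
def Claim_equal_product_allocation : Prop := ∀ (array1 : List Int) (array2 : List Int), Dom_product_allocation array1 array2 → Pre_product_allocation array1 array2 → Spec_product_allocation array1 array2 (product_allocation array1 array2)

-- ===== LEMMAS AND PROOFS =====

-- quick_sort is Python's sorted ------------------------------------------------

theorem filter_three_perm (l : List Int) (v : Int) :
    (l.filter (fun i => i < v) ++ l.filter (fun i => i == v) ++ l.filter (fun i => i > v)).Perm l := by
  rw [List.perm_iff_count]
  intro a
  have hcf : ∀ (p : Int → Bool), (l.filter p).count a = if p a then l.count a else 0 := by
    intro p
    by_cases hpa : p a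
    · simp [List.count_filter, hpa]
    · simp only [hpa, if_neg, Bool.false_eq_true, not_false_iff]
      rw [List.count_eq_zero]
      intro hm
      exact hpa (List.mem_filter.mp hm).2
  simp only [List.count_append, hcf]
  rcases lt_trichotomy a v with h | h | h
  · simp [h, not_lt.mpr h.le, h.ne]
  · simp [h]
  · simp [h, not_lt.mpr h.le, h.ne']

theorem pairwise_le_of_all_eq (v : Int) (l : List Int) (h : ∀ x ∈ l, x = v) :
    l.Pairwise (· ≤ ·) := by
  induction l with
  | nil => exact List.Pairwise.nil
  | cons y t ih =>
    refine List.Pairwise.cons (fun z hz => ?_) (ih fun x hx => h x (List.mem_cons_of_mem _ hx))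
    rw [h y List.mem_cons_self, h z (List.mem_cons_of_mem _ hz)]

theorem quickSortGo_filters_lt (a : List Int) (h : 1 < a.length) :
    (a.filter (fun i => i < a.getD (a.length / 2) 0)).length < a.length ∧
    (a.filter (fun i => i > a.getD (a.length / 2) 0)).length < a.length := by
  have hval : a.getD (a.length / 2) 0 ∈ a := by
    rw [List.getD_eq_getElem a 0 (by omega)]
    exact List.getElem_mem _
  constructor <;>
    · rw [List.length_filter_lt_length_iff_exists]
      exact ⟨a.getD (a.length / 2) 0, hval, by simp⟩

theorem quickSortGo_perm : ∀ (f : Nat) (a : List Int), a.length ≤ f →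
    (quickSortGo f a).Perm a := by
  intro f
  induction f with
  | zero => intro a _; exact List.Perm.refl a
  | succ f ih =>
    intro a ha
    rw [quickSortGo]
    split
    · next h =>
      obtain ⟨h1, h2⟩ := quickSortGo_filters_lt a h
      exact (((ih _ (by omega)).append (List.Perm.refl _)).append
        (ih _ (by omega))).trans (filter_three_perm a _)
    · exact List.Perm.refl a

theorem quickSortA_perm (a : List Int) : (quickSortA a).Perm a :=
  quickSortGo_perm a.length a le_rfl

theorem quickSortGo_pairwise : ∀ (f : Nat) (a : List Int), a.length ≤ f →
    (quickSortGo f a).Pairwise (· ≤ ·) := by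
  intro f
  induction f with
  | zero =>
    intro a ha
    have : a = [] := List.length_eq_zero_iff.mp (by omega)
    subst this
    exact List.Pairwise.nil
  | succ f ih =>
    intro a ha
    rw [quickSortGo]
    split
    · next h =>
      obtain ⟨hl1, hl2⟩ := quickSortGo_filters_lt a h
      have hmemL : ∀ x ∈ quickSortGo f (a.filter (fun i => i < a.getD (a.length / 2) 0)),
          x < a.getD (a.length / 2) 0 := by
        intro x hx
        have := (quickSortGo_perm f _ (by omega)).mem_iff.mp hx
        simpa using (List.mem_filter.mp this).2
      have hmemM : ∀ x ∈ a.filter (fun i => i == a.getD (a.length / 2) 0),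
          x = a.getD (a.length / 2) 0 := by
        intro x hx
        simpa using (List.mem_filter.mp hx).2
      have hmemR : ∀ x ∈ quickSortGo f (a.filter (fun i => i > a.getD (a.length / 2) 0)),
          a.getD (a.length / 2) 0 < x := by
        intro x hx
        have := (quickSortGo_perm f _ (by omega)).mem_iff.mp hx
        simpa using (List.mem_filter.mp this).2
      rw [List.pairwise_append, List.pairwise_append]
      refine ⟨⟨ih _ (by omega), pairwise_le_of_all_eq _ _ hmemM, ?_⟩, ih _ (by omega), ?_⟩
      · intro x hx y hy
        have h1 := hmemL x hx
        have h2 := hmemM y hy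
        omega
      · intro x hx y hy
        have h2 := hmemR y hy
        rcases List.mem_append.mp hx with hx | hx
        · have h1 := hmemL x hx; omega
        · have h1 := hmemM x hx; omega
    · next h =>
      rcases a with _ | ⟨x, _ | ⟨y, t⟩⟩
      · exact List.Pairwise.nil
      · exact List.pairwise_singleton _ x
      · exact absurd (by simp) h

theorem quickSortA_pairwise (a : List Int) : (quickSortA a).Pairwise (· ≤ ·) :=
  quickSortGo_pairwise a.length a le_rfl

theorem quickSortA_eq_sorted (a : List Int) :
    quickSortA a = PySem.List.sorted a (fun x => x) false := by
  have h := PySem.List.sorted_id_eq_of_perm_of_pairwise a (quickSortA a)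
    (quickSortA_perm a) (quickSortA_pairwise a)
  exact h.symm

-- the weighted chunk sum both loops compute -----------------------------------

def pvChunks (m : Nat) : Int → Nat → List Int → Int
  | _, 0, _ => 0
  | j, c+1, T => (j + 1) * (T.take m).sum + pvChunks m (j + 1) c (T.drop m)

theorem sum_map_mul (l : List Int) (r : Int) : (l.map (fun x => x * r)).sum = r * l.sum := by
  induction l with
  | nil => simp
  | cons x t ih => simp [ih]; ring

-- A's segment loop computes pvChunks
theorem aLoop_eq (mI : Int) (hm : 1 ≤ mI) (c : Nat) :
    ∀ (S : List Int) (j s : Int), 0 ≤ j →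
    (PySem.List.pyRange (j + 1) (j + 1 + (c : Int)) 1).foldl
      (fun (st : Int × Int × Int) seg =>
        (st.1 + mI, st.2.1 + mI,
          (PySem.List.slice S (some st.1) (some st.2.1)).foldl
            (fun acc e => acc + e * seg) st.2.2))
      (j * mI, j * mI + mI, s)
    = ((j + (c : Int)) * mI, (j + (c : Int)) * mI + mI,
        s + pvChunks mI.toNat j c (S.drop (j * mI).toNat)) := by
  induction c with
  | zero =>
    intro S j s hj
    rw [show ((0 : Nat) : Int) = 0 from rfl, add_zero,
      PySem.List.pyRange_one_eq_nil le_rfl]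
    simp [pvChunks]
  | succ c ih =>
    intro S j s hj
    have hjm : 0 ≤ j * mI := mul_nonneg hj (by omega)
    have hstep : j + 1 < j + 1 + ((c + 1 : Nat) : Int) := by push_cast; omega
    rw [PySem.List.pyRange_one_cons hstep]
    rw [List.foldl_cons]
    -- the slice of the first segment
    have hslice : PySem.List.slice S (some (j * mI)) (some (j * mI + mI))
        = (S.drop (j * mI).toNat).take mI.toNat := by
      rw [PySem.List.slice_toNat S (by positivity) (by positivity)]
      congr 1
      omega
    have hinner : (PySem.List.slice S (some (j * mI)) (some (j * mI + mI))).foldl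
        (fun acc e => acc + e * (j + 1)) s
        = s + (j + 1) * ((S.drop (j * mI).toNat).take mI.toNat).sum := by
      rw [hslice, PySem.List.foldl_add (g := fun e => e * (j + 1))]
      rw [sum_map_mul]
    have hih := ih S (j + 1) (s + (j + 1) * ((S.drop (j * mI).toNat).take mI.toNat).sum)
      (by omega)
    have harg1 : j * mI + mI = (j + 1) * mI := by ring
    have harg2 : j + 1 + 1 = (j + 1) + 1 := by ring
    have harg3 : j + 1 + ((c + 1 : Nat) : Int) = (j + 1) + 1 + (c : Int) := by
      push_cast; ring
    have hdrop : S.drop ((j + 1) * mI).toNat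
        = (S.drop (j * mI).toNat).drop mI.toNat := by
      rw [List.drop_drop]
      congr 1
      have : (j + 1) * mI = j * mI + mI := by ring
      omega
    rw [hinner, harg1, harg3] at *
    rw [hih]
    refine Prod.ext ?_ (Prod.ext ?_ ?_) <;> simp only
    · push_cast; ring
    · push_cast; ring
    · rw [pvChunks, hdrop]
      ring

theorem pfx_build : ∀ (T acc : List Int) (b : Int),
    T.foldl (fun acc x => acc ++ [PySem.List.pyGetD acc (-1) 0 + x]) (acc ++ [b])
    = acc ++ List.scanl (· + ·) b T := by
  intro T
  induction T with
  | nil => intro acc b; simp [List.scanl]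
  | cons x t ih =>
    intro acc b
    rw [List.foldl_cons, PySem.List.pyGetD_neg_one_append_singleton, List.append_assoc]
    rw [show [b] ++ [b + x] = [b] ++ [b + x] from rfl, ← List.append_assoc, ih (acc ++ [b]) (b + x)]
    simp [List.scanl]

theorem scanl_add_eq_map (T : List Int) : ∀ (b : Int),
    List.scanl (· + ·) b T = (List.range (T.length + 1)).map (fun j => b + (T.take j).sum) := by
  induction T with
  | nil => intro b; simp
  | cons x t ih =>
    intro b
    rw [List.scanl_cons, ih (b + x), List.length_cons]
    conv_rhs => rw [List.range_succ_eq_map]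
    rw [List.map_cons, List.map_map]
    simp only [List.take_zero, List.sum_nil, add_zero]
    congr 1
    apply List.map_congr_left
    intro j _
    simp [List.take_succ_cons, add_assoc]

theorem pfx_getD (T : List Int) (b : Int) (hb : 0 ≤ b) :
    PySem.List.pyGetD (T.foldl (fun acc x => acc ++ [PySem.List.pyGetD acc (-1) 0 + x]) [0])
      (min b (T.length : Int)) 0 = (T.take b.toNat).sum := by
  have h1 := pfx_build T [] 0
  rw [List.nil_append] at h1
  rw [h1, List.nil_append, scanl_add_eq_map]
  have hidx0 : 0 ≤ min b (T.length : Int) := le_min hb (by positivity)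
  have hidxle : min b (T.length : Int) ≤ (T.length : Int) := min_le_right _ _
  rw [PySem.List.pyGetD_eq_getElem _ _ hidx0 (by rw [List.length_map, List.length_range]; omega)]
  rw [List.getElem_map, List.getElem_range, zero_add]
  by_cases hbl : b.toNat ≤ T.length
  · have h : (min b (T.length : Int)).toNat = b.toNat := by omega
    rw [h]
  · have h : (min b (T.length : Int)).toNat = T.length := by omega
    rw [h, List.take_length, List.take_of_length_le (by omega)]

-- B's prefix-difference segment loop also computes pvChunks
theorem bLoopP_eq (mI : Int) (hm : 1 ≤ mI) (T : List Int) (c : Nat) : ∀ (j s : Int), 0 ≤ j →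
    (PySem.List.pyRange (j + 1) (j + 1 + (c : Int)) 1).foldl
      (fun acc seg => acc + seg * ((T.take (seg * mI).toNat).sum
        - (T.take ((seg - 1) * mI).toNat).sum)) s
    = s + pvChunks mI.toNat j c (T.drop (j * mI).toNat) := by
  induction c with
  | zero =>
    intro j s hj
    rw [show ((0 : Nat) : Int) = 0 from rfl, add_zero, PySem.List.pyRange_one_eq_nil le_rfl]
    simp [pvChunks]
  | succ c ih =>
    intro j s hj
    have hjm : 0 ≤ j * mI := mul_nonneg hj (by omega)
    rw [PySem.List.pyRange_one_cons (by push_cast; omega), List.foldl_cons]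
    have hchunk : (T.take ((j + 1) * mI).toNat).sum - (T.take ((j + 1 - 1) * mI).toNat).sum
        = ((T.drop (j * mI).toNat).take mI.toNat).sum := by
      have h1 : (j + 1 - 1) * mI = j * mI := by ring
      have h2 : ((j + 1) * mI).toNat = (j * mI).toNat + mI.toNat := by
        have : (j + 1) * mI = j * mI + mI := by ring
        omega
      rw [h1, h2, List.take_add, List.sum_append]
      ring
    rw [hchunk]
    have hih := ih (j + 1) (s + (j + 1) * ((T.drop (j * mI).toNat).take mI.toNat).sum)
      (by omega)
    have harg : j + 1 + ((c + 1 : Nat) : Int) = (j + 1) + 1 + (c : Int) := by push_cast; ring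
    have hdrop : T.drop ((j + 1) * mI).toNat = (T.drop (j * mI).toNat).drop mI.toNat := by
      rw [List.drop_drop]
      congr 1
      have : (j + 1) * mI = j * mI + mI := by ring
      omega
    rw [harg, hih, hdrop]
    rw [show pvChunks mI.toNat j (c + 1) (T.drop (j * mI).toNat)
        = (j + 1) * ((T.drop (j * mI).toNat).take mI.toNat).sum
          + pvChunks mI.toNat (j + 1) c ((T.drop (j * mI).toNat).drop mI.toNat) from rfl]
    ring

theorem product_allocation_spec : Claim_equal_product_allocation := by
  unfold Claim_equal_product_allocation
  intro array1 array2 _ hpre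
  obtain ⟨h2, hmne, hmn, hcorner⟩ := hpre
  have hg1 : PySem.List.pyGetD array1 (1:Int) 0 = array1.getD 1 0 := by
    rw [show (1:Int) = ((1:Nat):Int) by norm_num, PySem.List.pyGetD_natCast]
  simp only [Spec_product_allocation, product_allocation, product_allocation_alt,
    PySem.List.pyGetD_zero, hg1]
  rw [if_neg (show ¬ array1.getD 1 0 > array1.getD 0 0 by omega),
    if_neg (show ¬ array1.getD 1 0 > array1.getD 0 0 by omega)]
  rw [← quickSortA_eq_sorted array2]
  set mv := array1.getD 1 0 with hmv
  set nv := array1.getD 0 0 with hnv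
  set S := quickSortA array2 with hS
  set q := PySem.Int.floordiv nv mv with hq
  set r := PySem.Int.mod nv mv with hr
  have hdec : q * mv + r = nv := PySem.Int.floordiv_mul_add_mod nv mv
  by_cases hm0 : 0 < mv
  · -- the task's domain: positive segment size
    have hm1 : 1 ≤ mv := hm0
    have hq1 : 1 ≤ q := by rw [hq, PySem.Int.le_floordiv_iff_mul_le hm0]; omega
    have hr0 : 0 ≤ r := by rw [hr]; exact PySem.Int.mod_nonneg nv hm0
    have hmvN : ((mv.toNat : Nat) : Int) = mv := Int.toNat_of_nonneg (by omega)
    have hPfx : ∀ b : Int, 0 ≤ b →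
        PySem.List.pyGetD
          (S.foldl (fun acc x => acc ++ [PySem.List.pyGetD acc (-1) 0 + x]) [0])
          (min b (S.length : Int)) 0 = (S.take b.toNat).sum := fun b hb => pfx_getD S b hb
    by_cases hrp : r > 0
    · simp only [if_pos hrp]
      set k := q - 1 with hk
      have hk0 : 0 ≤ k := by omega
      have hc : ((k.toNat : Nat) : Int) = k := Int.toNat_of_nonneg hk0
      rw [← hc]
      set c := k.toNat with hcdef
      have hcongB : ∀ (acc : Int), ∀ seg ∈ PySem.List.pyRange 1 ((c : Int) + 1) 1,
          acc + seg * (PySem.List.pyGetD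
              (S.foldl (fun acc x => acc ++ [PySem.List.pyGetD acc (-1) 0 + x]) [0])
              (min (seg * mv) (S.length : Int)) 0
            - PySem.List.pyGetD
              (S.foldl (fun acc x => acc ++ [PySem.List.pyGetD acc (-1) 0 + x]) [0])
              (min ((seg - 1) * mv) (S.length : Int)) 0)
          = acc + seg * ((S.take (seg * mv).toNat).sum - (S.take ((seg - 1) * mv).toNat).sum) := by
        intro acc seg hseg
        have h1 : 1 ≤ seg := (PySem.List.mem_pyRange_one.mp hseg).1
        rw [hPfx (seg * mv) (mul_nonneg (by omega) (by omega)),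
          hPfx ((seg - 1) * mv) (mul_nonneg (by omega) (by omega))]
      rw [PySem.List.foldl_congr_mem _ _
        (fun acc seg => acc + seg * ((S.take (seg * mv).toNat).sum
          - (S.take ((seg - 1) * mv).toNat).sum)) _ hcongB]
      have hA := aLoop_eq mv hm1 c S 0 0 le_rfl
      have hB := bLoopP_eq mv hm1 S c 0 0 le_rfl
      simp only [zero_mul, zero_add, Int.toNat_zero, List.drop_zero] at hA hB
      rw [show (1:Int) + (c : Int) = (c : Int) + 1 by ring] at hA hB
      rw [hA, hB]
      simp only []
      rw [PySem.List.slice_from S (by positivity),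
        PySem.List.foldl_add (g := fun e => e * ((c : Int) + 1)), sum_map_mul,
        hPfx ((S.length : Int)) (by positivity), hPfx ((c : Int) * mv) (by positivity)]
      rw [Int.toNat_natCast, List.take_length]
      congr 1
      rw [← List.sum_take_add_sum_drop S ((c : Int) * mv).toNat]
      ring
    · simp only [if_neg hrp]
      have hc : ((q.toNat : Nat) : Int) = q := Int.toNat_of_nonneg (by omega)
      rw [← hc]
      set c := q.toNat with hcdef
      have hcongB : ∀ (acc : Int), ∀ seg ∈ PySem.List.pyRange 1 ((c : Int) + 1) 1,
          acc + seg * (PySem.List.pyGetD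
              (S.foldl (fun acc x => acc ++ [PySem.List.pyGetD acc (-1) 0 + x]) [0])
              (min (seg * mv) (S.length : Int)) 0
            - PySem.List.pyGetD
              (S.foldl (fun acc x => acc ++ [PySem.List.pyGetD acc (-1) 0 + x]) [0])
              (min ((seg - 1) * mv) (S.length : Int)) 0)
          = acc + seg * ((S.take (seg * mv).toNat).sum - (S.take ((seg - 1) * mv).toNat).sum) := by
        intro acc seg hseg
        have h1 : 1 ≤ seg := (PySem.List.mem_pyRange_one.mp hseg).1
        rw [hPfx (seg * mv) (mul_nonneg (by omega) (by omega)),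
          hPfx ((seg - 1) * mv) (mul_nonneg (by omega) (by omega))]
      rw [PySem.List.foldl_congr_mem _ _
        (fun acc seg => acc + seg * ((S.take (seg * mv).toNat).sum
          - (S.take ((seg - 1) * mv).toNat).sum)) _ hcongB]
      have hA := aLoop_eq mv hm1 c S 0 0 le_rfl
      have hB := bLoopP_eq mv hm1 S c 0 0 le_rfl
      simp only [zero_mul, zero_add, Int.toNat_zero, List.drop_zero] at hA hB
      rw [show (1:Int) + (c : Int) = (c : Int) + 1 by ring] at hA hB
      rw [hA, hB]
  · -- m < 0 (and then m < n by Pre_): both loops are empty and both return 0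
    have hmneg : mv < 0 := by omega
    have hmltn : mv < nv := by
      rcases hcorner with h | h
      · omega
      · omega
    have hrneg := PySem.Int.mod_neg_bounds (a := nv) hmneg
    have hq0 : q + 1 ≤ 1 := by
      by_contra hcon
      have h1q : 1 ≤ q := by omega
      have : q * mv ≤ 1 * mv := mul_le_mul_of_nonpos_right h1q (by omega)
      omega
    have hnr : ¬ (r > 0) := by omega
    simp only [if_neg hnr]
    rw [PySem.List.pyRange_one_eq_nil (by omega : (q + 1 : Int) ≤ 1)]
    rfl
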